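-- pv_equiv track=rewrite | github.com/pypi-data/pypi-mirror-402 | packages/batem/batem-0.3.1-py3-none-any.whl/batem/core/thermal.py | name_layers
-- ===== SOURCE A (Python) =====
-- def name_layers(left_name: str, right_name: str, number_of_layers: int, prefix: str = '') -> tuple[list[str], list[tuple[str, str]]]:
--     """generate series of suffixes to name a given number of layers: name are provided for each layer but also for the 2 borders delimiting a layer
--
--     :param left_name: left hand side existing layer name
--     :type left_name: str
--     :param right_name: right hand side existing layer name
--     :type right_name: str
--     :param number_of_layers: number of layers to be named
--     :type number_of_layers: int
--     :param prefix: prefix added to each name (and inside name by composition of names), defaults to ''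
--     :type prefix: str, optional
--     :return: first a list of names for each layer and second, a list of pairs of variable names representing both sides of a layer. Of course, the left hand side name of a layer n is equal to the right hand side name of the layer n-1
--     :rtype: tuple[list[str], list[tuple[str, str]]]
--     """
--     layer_border_names = list()
--     layer_names = list()
--     for i in range(number_of_layers):
--         left_border_name: str = left_name + '-' + right_name + ':' + str(i - 1) if i > 0 else left_name
--         right_border_name: str = left_name + '-' + right_name + ':' + str(i) if i < number_of_layers-1 else right_name
--         layer_border_names.append((prefix+left_border_name, prefix+right_border_name))
--         layer_names.append(prefix+left_name + '-' + right_name + ':' + str(i) + 'm')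
--     return layer_names, layer_border_names
-- ===== SOURCE B (Python) =====
-- def name_layers(left_name: str, right_name: str, number_of_layers: int, prefix: str = '') -> tuple[list[str], list[tuple[str, str]]]:
--     if number_of_layers <= 0:
--         return [], []
--     nodes = ([left_name]
--              + [f'{left_name}-{right_name}:{k}' for k in range(number_of_layers - 1)]
--              + [right_name])
--     layer_border_names = [(prefix + a, prefix + b) for a, b in zip(nodes, nodes[1:])]
--     layer_names = [f'{prefix}{left_name}-{right_name}:{i}m' for i in range(number_of_layers)]
--     return layer_names, layer_border_names
-- ===== Notes on version B (the rewrite author's own statement) =====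
-- stated objective: simpler
-- what changed: Instead of recomputing each layer's left/right border name with per-index conditionals inside one loop, B builds the list of border nodes once (left_name, interior junction names, right_name) and forms the border pairs by zipping adjacent nodes; layer names come from a separate comprehension.
import Mathlib
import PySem

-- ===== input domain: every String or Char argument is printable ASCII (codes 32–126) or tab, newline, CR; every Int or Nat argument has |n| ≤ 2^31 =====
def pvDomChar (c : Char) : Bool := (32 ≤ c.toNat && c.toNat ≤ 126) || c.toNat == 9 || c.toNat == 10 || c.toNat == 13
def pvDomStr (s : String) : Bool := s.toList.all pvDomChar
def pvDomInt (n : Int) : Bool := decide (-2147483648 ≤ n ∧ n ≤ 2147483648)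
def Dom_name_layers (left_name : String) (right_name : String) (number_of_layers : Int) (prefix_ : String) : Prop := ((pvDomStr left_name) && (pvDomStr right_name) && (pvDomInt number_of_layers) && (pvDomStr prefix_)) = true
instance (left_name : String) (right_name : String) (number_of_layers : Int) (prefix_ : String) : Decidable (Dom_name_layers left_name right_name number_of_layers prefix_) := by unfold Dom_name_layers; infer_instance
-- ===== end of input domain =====

-- B replaces A's per-index border-name conditionals by building the list of border nodes once
-- and zipping adjacent nodes (objective: simpler decomposition; same cost).

-- ===== PORT A =====
-- literal transliteration: one loop over range(number_of_layers), appending to both lists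
def name_layers (left_name : String) (right_name : String) (number_of_layers : Int) (prefix_ : String) : List String × (List (String × String)) :=
  let res := (PySem.List.pyRange 0 number_of_layers 1).foldl
    (fun acc i =>
      let left_border_name : String :=
        if i > 0 then left_name ++ "-" ++ right_name ++ ":" ++ PySem.Int.toStr (i - 1) else left_name
      let right_border_name : String :=
        if i < number_of_layers - 1 then left_name ++ "-" ++ right_name ++ ":" ++ PySem.Int.toStr i else right_name
      (acc.1 ++ [(prefix_ ++ left_border_name, prefix_ ++ right_border_name)],
       acc.2 ++ [prefix_ ++ left_name ++ "-" ++ right_name ++ ":" ++ PySem.Int.toStr i ++ "m"]))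
    ([], [])
  (res.2, res.1)

-- ===== PORT B =====
def name_layers_alt (left_name : String) (right_name : String) (number_of_layers : Int) (prefix_ : String) : List String × (List (String × String)) :=
  if number_of_layers ≤ 0 then ([], [])
  else
    let nodes : List String :=
      [left_name]
        ++ (PySem.List.pyRange 0 (number_of_layers - 1) 1).map
             (fun k => left_name ++ "-" ++ right_name ++ ":" ++ PySem.Int.toStr k)
        ++ [right_name]
    let layer_border_names := (nodes.zip nodes.tail).map (fun ab => (prefix_ ++ ab.1, prefix_ ++ ab.2))
    let layer_names := (PySem.List.pyRange 0 number_of_layers 1).map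
      (fun i => prefix_ ++ left_name ++ "-" ++ right_name ++ ":" ++ PySem.Int.toStr i ++ "m")
    (layer_names, layer_border_names)

-- ===== PRECONDITION & SPEC =====
def Spec_name_layers (left_name : String) (right_name : String) (number_of_layers : Int) (prefix_ : String) (out : List String × (List (String × String))) : Prop := out = name_layers_alt left_name right_name number_of_layers prefix_
instance (left_name : String) (right_name : String) (number_of_layers : Int) (prefix_ : String) (out : List String × (List (String × String))) : Decidable (Spec_name_layers left_name right_name number_of_layers prefix_ out) := by unfold Spec_name_layers; infer_instance

-- ===== CLAIM (what is proved, stated in full; the proofs are below) =====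
def Claim_equal_name_layers : Prop := ∀ (left_name : String) (right_name : String) (number_of_layers : Int) (prefix_ : String), Dom_name_layers left_name right_name number_of_layers prefix_ → Spec_name_layers left_name right_name number_of_layers prefix_ (name_layers left_name right_name number_of_layers prefix_)

-- ===== LEMMAS AND PROOFS =====

-- A's loop appends one element to each of the two accumulated lists per iteration:
-- the fold is the pair of maps.
theorem foldl_two_append {α β : Type} (g : Int → α) (f : Int → β) (xs : List Int)
    (a : List α) (b : List β) :
    xs.foldl (fun acc i => (acc.1 ++ [g i], acc.2 ++ [f i])) (a, b)
      = (a ++ xs.map g, b ++ xs.map f) := by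
  induction xs generalizing a b with
  | nil => simp
  | cons x xs ih => simp [List.foldl_cons, ih]

-- the j-th border node of [l] ++ mid ++ [r]
theorem nodes_getElem {l r : String} (mid : List String) (j : Nat)
    (hj : j < mid.length + 2) :
    ([l] ++ mid ++ [r])[j]'(by simp; omega)
      = if j = 0 then l
        else if j = mid.length + 1 then r
        else mid.getD (j - 1) r := by
  match j with
  | 0 => simp
  | Nat.succ j =>
    have hstep : ([l] ++ mid ++ [r])[j + 1]'(by simp; omega)
        = (mid ++ [r])[j]'(by simp; omega) := rfl
    rw [hstep]
    by_cases hjm : j < mid.length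
    · rw [List.getElem_append_left hjm, if_neg (by omega), if_neg (by omega),
        List.getD_eq_getElem mid r (by omega)]
      simp
    · have hj' : j = mid.length := by omega
      rw [List.getElem_append_right (by omega), if_neg (by omega), if_pos (by omega)]
      simp [hj']

theorem name_layers_spec : Claim_equal_name_layers := by
  unfold Claim_equal_name_layers
  intro l r n p _
  unfold Spec_name_layers name_layers name_layers_alt
  rw [foldl_two_append]
  by_cases hn : n ≤ 0
  · simp [hn, PySem.List.pyRange_one_eq_nil (by omega : n ≤ 0)]
  · simp only [if_neg hn, List.nil_append]
    refine Prod.ext rfl ?_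
    set s : Int → String := fun k => l ++ "-" ++ r ++ ":" ++ PySem.Int.toStr k with hs
    set mid : List String := (PySem.List.pyRange 0 (n - 1) 1).map s with hmid
    have hlenmid : mid.length = n.toNat - 1 := by
      simp [hmid, PySem.List.length_pyRange_one]
    have hlen1 : ([l] ++ mid ++ [r]).length = mid.length + 2 := by simp
    have hlen2 : (mid ++ [r]).length = mid.length + 1 := by simp
    have htail : ([l] ++ mid ++ [r]).tail = mid ++ [r] := by simp
    apply List.ext_getElem
    · simp only [List.length_map, List.length_zip, PySem.List.length_pyRange_one, htail,
        hlen1, hlen2, hlenmid]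
      omega
    · intro k h1 h2
      have hk : k < n.toNat := by
        simpa [PySem.List.length_pyRange_one] using h1
      have hn1 : 1 ≤ n.toNat := by omega
      simp only [List.getElem_map, List.getElem_zip, PySem.List.getElem_pyRange_one, htail]
      have hmidk : ∀ (m : Nat) (hm : m < mid.length), mid[m]'hm = s (m : Int) := by
        intro m hm
        have hmm : m < n.toNat - 1 := by omega
        have hsplit : mid[m]'hm
            = ((PySem.List.pyRange 0 (n - 1) 1).map s)[m]'(by
                simp [PySem.List.length_pyRange_one]; omega) := rfl
        rw [hsplit, List.getElem_map, PySem.List.getElem_pyRange_one]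
        congr 1
        omega
      have hL :
          ([l] ++ mid ++ [r])[k]'(by rw [hlen1]; omega)
            = if (0 : Int) + (k : Int) > 0 then s ((0 : Int) + (k : Int) - 1) else l := by
        rw [nodes_getElem mid k (by omega)]
        rcases Nat.eq_zero_or_pos k with h0 | h0
        · simp [h0]
        · rw [if_neg (by omega), if_neg (by omega), if_pos (by omega),
            List.getD_eq_getElem mid r (by omega), hmidk (k - 1) (by omega)]
          congr 1
          omega
      have hR :
          (mid ++ [r])[k]'(by rw [hlen2]; omega)
            = if (0 : Int) + (k : Int) < n - 1 then s ((0 : Int) + (k : Int)) else r := by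
        have hstep : (mid ++ [r])[k]'(by rw [hlen2]; omega)
            = ([l] ++ mid ++ [r])[k + 1]'(by rw [hlen1]; omega) := rfl
        rw [hstep, nodes_getElem mid (k + 1) (by omega)]
        by_cases hlast : k + 1 = mid.length + 1
        · rw [if_neg (by omega), if_pos hlast, if_neg (by omega)]
        · rw [if_neg (by omega), if_neg hlast, if_pos (by omega),
            List.getD_eq_getElem mid r (by omega), hmidk (k + 1 - 1) (by omega)]
          congr 1
          omega
      rw [hL, hR]

-- ===== VERDICT (by name: the statement is the Claim_ definition above) =====
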